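-- pv_equiv track=rewrite | github.com/connesy/ProjectEuler | python/problem033/problem033.py | cancel_digits
-- ===== SOURCE A (Python) =====
-- def cancel_digits(numerator: int, denominator: int) -> tuple[int, int]:
--     numerator_str, denominator_str = str(numerator), str(denominator)
--     for digit in range(1, 10):
--         if str(digit) in numerator_str and str(digit) in denominator_str:
--             numerator_str = numerator_str.replace(str(digit), "", 1)
--             denominator_str = denominator_str.replace(str(digit), "", 1)
--
--     cancelled_numerator = 0 if numerator_str == "" else int(numerator_str)
--     cancelled_denominator = 0 if denominator_str == "" else int(denominator_str)
--
--     return (cancelled_numerator, cancelled_denominator)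
-- ===== SOURCE B (Python) =====
-- def cancel_digits(numerator: int, denominator: int) -> tuple[int, int]:
--     numerator_str, denominator_str = str(numerator), str(denominator)
--     common = set(numerator_str) & set(denominator_str) & set("123456789")
--
--     def reduce(s: str) -> int:
--         pending = set(common)
--         kept = []
--         for c in s:
--             if c in pending:
--                 pending.discard(c)
--             else:
--                 kept.append(c)
--         r = "".join(kept)
--         return int(r) if r else 0
--
--     return (reduce(numerator_str), reduce(denominator_str))
-- ===== Notes on version B (the rewrite author's own statement) =====
-- stated objective: simpler
-- what changed: B computes the set of shared non-zero digits once and then builds each result in a single left-to-right scan over the digit string with a pending-cancellation set, instead of A's nine separate membership-test-plus-replace passes over both strings.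
import Mathlib
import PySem

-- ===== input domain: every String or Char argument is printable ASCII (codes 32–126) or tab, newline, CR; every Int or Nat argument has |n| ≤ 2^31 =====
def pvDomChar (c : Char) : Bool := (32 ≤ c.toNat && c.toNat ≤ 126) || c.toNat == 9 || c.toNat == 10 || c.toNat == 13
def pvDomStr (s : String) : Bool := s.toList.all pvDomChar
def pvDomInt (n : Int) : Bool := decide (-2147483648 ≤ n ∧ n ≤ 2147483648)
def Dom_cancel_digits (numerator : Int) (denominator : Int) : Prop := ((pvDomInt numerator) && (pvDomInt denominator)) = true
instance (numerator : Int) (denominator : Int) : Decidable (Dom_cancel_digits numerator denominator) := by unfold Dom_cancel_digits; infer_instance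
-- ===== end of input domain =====

-- B computes the shared non-zero digits once and cancels them in one scan per string with a
-- pending set, instead of A's nine membership-test-plus-replace passes (objective: simpler).


-- ===== PORT A =====
-- Python `s.replace(p, "", 1)` removes the first occurrence of p; exact here because the
-- pattern is always a single digit character (str(digit) for digit in range(1, 10)).
def pvReplaceFirstEmpty (s : List Char) (p : List Char) : List Char :=
  match p with
  | [c] => s.erase c
  | _ => s   -- unreachable: p = str(digit) is a single character

-- the body of A's `for digit in range(1, 10)` loop, acting on (numerator_str, denominator_str)
def pvAStep (st : List Char × List Char) (digit : Int) : List Char × List Char :=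
  let dc := PySem.Int.toChars digit
  if PySem.Chars.isIn dc st.1 && PySem.Chars.isIn dc st.2 then
    (pvReplaceFirstEmpty st.1 dc, pvReplaceFirstEmpty st.2 dc)
  else st

-- `0 if s == "" else int(s)` (same in both programs); ofChars? = none is Python's
-- ValueError, excluded by Pre_
def pvToInt (s : List Char) : Int :=
  if s = [] then 0 else (PySem.Int.ofChars? s).getD 0

def cancel_digits (numerator : Int) (denominator : Int) : Int × Int :=
  let st := (PySem.List.pyRange 1 10 1).foldl pvAStep
    (PySem.Int.toChars numerator, PySem.Int.toChars denominator)
  (pvToInt st.1, pvToInt st.2)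

-- ===== PORT B =====
-- B's single scan: keep each char unless it is in the pending cancellation set, in which
-- case drop it and remove it from the pending set.
def pvKeepScan : List Char → PySem.Set Char → List Char
  | [], _ => []
  | c :: cs, p =>
    if PySem.Set.contains p c then pvKeepScan cs (PySem.Set.discard p c)
    else c :: pvKeepScan cs p

def cancel_digits_alt (numerator : Int) (denominator : Int) : Int × Int :=
  let ns := PySem.Int.toChars numerator
  let ds := PySem.Int.toChars denominator
  let common := PySem.Set.inter (PySem.Set.inter (PySem.Set.ofList ns) (PySem.Set.ofList ds))
    (PySem.Set.ofList ("123456789".toList))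
  (pvToInt (pvKeepScan ns common), pvToInt (pvKeepScan ds common))

-- ===== PRECONDITION & SPEC =====
-- One side of a fraction turns into the string "-" (int("-") raises ValueError in both A and B)
-- exactly when the number is negative and each of its digits is non-zero, occurs once, and also
-- occurs in the other number's string; Pre_ excludes exactly those inputs.
def pvBadSide (n : Int) (other : List Char) : Prop :=
  n < 0 ∧ ((PySem.Int.toChars n).drop 1).Nodup ∧
    ∀ c ∈ (PySem.Int.toChars n).drop 1, c ≠ '0' ∧ c ∈ other

def Pre_cancel_digits (numerator : Int) (denominator : Int) : Prop :=
  ¬ pvBadSide numerator (PySem.Int.toChars denominator) ∧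
  ¬ pvBadSide denominator (PySem.Int.toChars numerator)

instance (numerator : Int) (denominator : Int) : Decidable (Pre_cancel_digits numerator denominator) := by
  unfold Pre_cancel_digits pvBadSide; infer_instance

def pvWitness_cancel_digits : Int × Int := (49, 98)

def Spec_cancel_digits (numerator : Int) (denominator : Int) (out : Int × Int) : Prop := out = cancel_digits_alt numerator denominator
instance (numerator : Int) (denominator : Int) (out : Int × Int) : Decidable (Spec_cancel_digits numerator denominator out) := by unfold Spec_cancel_digits; infer_instance

-- ===== CLAIM (what is proved, stated in full; the proofs are below) =====
def Claim_equal_cancel_digits : Prop := ∀ (numerator : Int) (denominator : Int), Dom_cancel_digits numerator denominator → Pre_cancel_digits numerator denominator → Spec_cancel_digits numerator denominator (cancel_digits numerator denominator)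

-- ===== LEMMAS AND PROOFS =====

-- canonical form of A's loop body, on an abstract digit character
def pvStep (st : List Char × List Char) (c : Char) : List Char × List Char :=
  if c ∈ st.1 ∧ c ∈ st.2 then (st.1.erase c, st.2.erase c) else st

theorem pv_isIn_singleton (c : Char) (s : List Char) :
    PySem.Chars.isIn [c] s = decide (c ∈ s) := by
  by_cases h : c ∈ s
  · have hi : [c] <:+: s := by
      obtain ⟨u, v, rfl⟩ := List.append_of_mem h
      exact ⟨u, v, by simp⟩
    have h1 : PySem.Chars.isIn [c] s = true := (PySem.Chars.isIn_iff_infix [c] s).mpr hi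
    simp [h1, h]
  · have h1 : ¬ ([c] <:+: s) := fun hi => h (List.IsInfix.mem (by simp) hi)
    have h2 : PySem.Chars.isIn [c] s = false := by
      rw [← Bool.not_eq_true, PySem.Chars.isIn_iff_infix]; exact h1
    simp [h2, h]

theorem pvAStep_eq (k : Int) (c : Char) (h : PySem.Int.toChars k = [c]) (st : List Char × List Char) :
    pvAStep st k = pvStep st c := by
  simp only [pvAStep, h, pvStep, pvReplaceFirstEmpty, pv_isIn_singleton]
  by_cases h1 : c ∈ st.1 <;> by_cases h2 : c ∈ st.2 <;> simp [h1, h2]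

theorem pvAfold_eq (st : List Char × List Char) :
    (PySem.List.pyRange 1 10 1).foldl pvAStep st =
      ("123456789".toList).foldl pvStep st := by
  have hr : PySem.List.pyRange 1 10 1 = [1,2,3,4,5,6,7,8,9] := by decide
  have hs : "123456789".toList = ['1','2','3','4','5','6','7','8','9'] := by decide
  rw [hr, hs]
  simp only [List.foldl]
  rw [pvAStep_eq 1 '1' (by decide), pvAStep_eq 2 '2' (by decide), pvAStep_eq 3 '3' (by decide),
    pvAStep_eq 4 '4' (by decide), pvAStep_eq 5 '5' (by decide), pvAStep_eq 6 '6' (by decide),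
    pvAStep_eq 7 '7' (by decide), pvAStep_eq 8 '8' (by decide), pvAStep_eq 9 '9' (by decide)]

-- folding List.erase over [] is []
theorem pv_eraseAll_nil (P : List Char) : P.foldl List.erase [] = [] := by
  induction P with
  | nil => rfl
  | cons d P ih => simpa using ih

-- folding List.erase is invariant under permutation of the erased list
theorem pv_eraseAll_perm (x : List Char) {P Q : List Char} (h : P.Perm Q) :
    P.foldl List.erase x = Q.foldl List.erase x := by
  induction h generalizing x with
  | nil => rfl
  | cons d _ ih => simpa using ih _
  | swap a b l => simp [List.foldl, List.erase_comm]
  | trans _ _ ih1 ih2 => exact (ih1 x).trans (ih2 x)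

theorem pv_eraseAll_cons_not_mem (P : List Char) (s : List Char) (c : Char) (h : c ∉ P) :
    P.foldl List.erase (c :: s) = c :: P.foldl List.erase s := by
  induction P generalizing s with
  | nil => rfl
  | cons d P ih =>
    have hdc : c ≠ d := fun hh => h (hh ▸ List.mem_cons_self ..)
    simp only [List.foldl]
    rw [List.erase_cons_tail (by simpa using hdc)]
    exact ih (s.erase d) (fun hm => h (List.mem_cons_of_mem d hm))

-- A's nine conditional passes = erase every shared digit once from each string
theorem pv_stepfold_eq (D : List Char) (hD : D.Nodup) (s t : List Char) :
    D.foldl pvStep (s, t) =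
      ((D.filter (fun c => decide (c ∈ s) && decide (c ∈ t))).foldl List.erase s,
       (D.filter (fun c => decide (c ∈ s) && decide (c ∈ t))).foldl List.erase t) := by
  induction D generalizing s t with
  | nil => rfl
  | cons d D ih =>
    have hdD : d ∉ D := (List.nodup_cons.mp hD).1
    have hD' : D.Nodup := (List.nodup_cons.mp hD).2
    by_cases h : d ∈ s ∧ d ∈ t
    · have hstep : pvStep (s, t) d = (s.erase d, t.erase d) := by simp [pvStep, h]
      have hfs : D.filter (fun c => decide (c ∈ s.erase d) && decide (c ∈ t.erase d)) =
          D.filter (fun c => decide (c ∈ s) && decide (c ∈ t)) := by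
        apply List.filter_congr
        intro c hc
        have hcd : c ≠ d := fun hh => hdD (hh ▸ hc)
        simp [List.mem_erase_of_ne hcd]
      have hfd : (d :: D).filter (fun c => decide (c ∈ s) && decide (c ∈ t)) =
          d :: D.filter (fun c => decide (c ∈ s) && decide (c ∈ t)) := by
        simp [h.1, h.2]
      simp only [List.foldl, hstep, hfd]
      rw [ih hD' (s.erase d) (t.erase d), hfs]
    · have hstep : pvStep (s, t) d = (s, t) := by simp [pvStep, h]
      have hcond : (decide (d ∈ s) && decide (d ∈ t)) = false := by
        rw [← Bool.decide_and]; simp [h]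
      have hfd : (d :: D).filter (fun c => decide (c ∈ s) && decide (c ∈ t)) =
          D.filter (fun c => decide (c ∈ s) && decide (c ∈ t)) := by
        simp [hcond]
      simp only [List.foldl, hstep, hfd]
      exact ih hD' s t

-- B's single scan with a pending set = erase every pending char once
theorem pv_keepScan_eq (s : List Char) (p : List Char) (hp : p.Nodup) :
    pvKeepScan s p = p.foldl List.erase s := by
  induction s generalizing p with
  | nil => exact (pv_eraseAll_nil p).symm
  | cons c s ih =>
    by_cases hc : c ∈ p
    · have hcb : PySem.Set.contains p c = true := by
        simp [PySem.Set.contains, List.contains_eq_mem, hc]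
      have hdis : PySem.Set.discard p c = p.erase c := by
        rw [hp.erase_eq_filter]; rfl
      rw [pvKeepScan, if_pos hcb, hdis, ih (p.erase c) (hp.erase c)]
      have hperm : p.Perm (c :: p.erase c) := List.perm_cons_erase hc
      rw [pv_eraseAll_perm (c :: s) hperm]
      simp [List.foldl, List.erase_cons_head]
    · have hcb : ¬ PySem.Set.contains p c = true := by
        simp [PySem.Set.contains, List.contains_eq_mem, hc]
      rw [pvKeepScan, if_neg hcb, ih p hp, pv_eraseAll_cons_not_mem p s c hc]

-- the intersection set built by B has no duplicates
theorem pv_common_nodup (ns ds : List Char) :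
    (PySem.Set.inter (PySem.Set.inter (PySem.Set.ofList ns)
      (PySem.Set.ofList ds)) (PySem.Set.ofList ("123456789".toList))).Nodup := by
  simp only [PySem.Set.inter]
  exact ((PySem.Set.nodup_ofList _).filter _).filter _

-- B's intersection set is a permutation of A's filtered digit list
theorem pv_common_perm (ns ds : List Char) :
    (PySem.Set.inter (PySem.Set.inter (PySem.Set.ofList ns)
      (PySem.Set.ofList ds)) (PySem.Set.ofList ("123456789".toList))).Perm
      (("123456789".toList).filter (fun c => decide (c ∈ ns) && decide (c ∈ ds))) := by
  rw [List.perm_ext_iff_of_nodup (pv_common_nodup ns ds) (((by decide : ("123456789".toList).Nodup)).filter _)]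
  intro c
  simp only [PySem.Set.mem_inter, PySem.Set.mem_ofList, List.mem_filter,
    Bool.and_eq_true, decide_eq_true_eq]
  tauto

-- ===== VERDICT (by name: the statement is the Claim_ definition above) =====
theorem cancel_digits_spec : Claim_equal_cancel_digits := by
  intro n d _ _
  unfold Spec_cancel_digits
  simp only [cancel_digits, cancel_digits_alt]
  generalize PySem.Int.toChars n = ns
  generalize PySem.Int.toChars d = ds
  rw [(pvAfold_eq (ns, ds)).trans (pv_stepfold_eq _ (by decide) ns ds)]
  rw [(pv_keepScan_eq ns _ (pv_common_nodup ns ds)).trans (pv_eraseAll_perm ns (pv_common_perm ns ds))]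
  rw [(pv_keepScan_eq ds _ (pv_common_nodup ns ds)).trans (pv_eraseAll_perm ds (pv_common_perm ns ds))]
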